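-- pv_equiv track=rewrite | github.com/SweetChristabel/Python_2024 | mooc-programming-24/10-04_word_game.py | round_winner
-- ===== SOURCE A (Python) =====
-- def round_winner(player1_word: str, player2_word: str):
--     vowels = ["a", "e", "i", "o", "u"]
--     play1w = 0
--     play2w = 0
--     for vowel in vowels:
--         play1w += player1_word.count(vowel)
--         play2w += player2_word.count(vowel)
--     if play1w > play2w:
--         return 1
--     elif play2w > play1w:
--         return 2
--     else:
--         return None
-- ===== SOURCE B (Python) =====
-- def round_winner(player1_word: str, player2_word: str):
--     vowels = set("aeiou")
--     c1 = sum(1 for ch in player1_word if ch in vowels)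
--     c2 = sum(1 for ch in player2_word if ch in vowels)
--     if c1 > c2:
--         return 1
--     if c2 > c1:
--         return 2
--     return None
-- ===== Notes on version B (the rewrite author's own statement) =====
-- stated objective: idiomatic
-- what changed: Instead of looping over the five vowels and scanning each word five times with str.count, B builds a vowel set once and counts vowels in a single pass over each word's characters.
import Mathlib
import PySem

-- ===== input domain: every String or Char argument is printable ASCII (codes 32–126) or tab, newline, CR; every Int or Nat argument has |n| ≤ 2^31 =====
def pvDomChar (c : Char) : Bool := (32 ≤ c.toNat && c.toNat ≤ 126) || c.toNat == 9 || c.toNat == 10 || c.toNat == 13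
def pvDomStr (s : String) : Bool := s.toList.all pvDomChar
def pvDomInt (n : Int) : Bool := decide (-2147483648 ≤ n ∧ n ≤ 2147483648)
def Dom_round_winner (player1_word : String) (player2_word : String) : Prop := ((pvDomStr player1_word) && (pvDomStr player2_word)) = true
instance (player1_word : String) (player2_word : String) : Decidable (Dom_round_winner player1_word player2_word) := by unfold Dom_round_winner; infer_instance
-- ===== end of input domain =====

-- B replaces A's loop over the five vowels (five str.count scans per word) by one pass
-- over each word's characters with a vowel-set membership test (objective: idiomatic).

-- ===== PORT A =====
def round_winner (player1_word : String) (player2_word : String) : Option Int :=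
  let vowels : List String := ["a", "e", "i", "o", "u"]
  let st : Int × Int := vowels.foldl
    (fun acc vowel =>
      (acc.1 + (PySem.Str.count player1_word vowel : Int),
       acc.2 + (PySem.Str.count player2_word vowel : Int)))
    (0, 0)
  if st.1 > st.2 then some 1
  else if st.2 > st.1 then some 2
  else none

-- ===== PORT B =====
def round_winner_alt (player1_word : String) (player2_word : String) : Option Int :=
  let vowels : PySem.Set Char := PySem.Set.ofList "aeiou".toList
  let c1 : Int := (player1_word.toList.countP (fun ch => vowels.contains ch) : Int)
  let c2 : Int := (player2_word.toList.countP (fun ch => vowels.contains ch) : Int)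
  if c1 > c2 then some 1
  else if c2 > c1 then some 2
  else none

-- ===== PRECONDITION & SPEC =====
def Spec_round_winner (player1_word : String) (player2_word : String) (out : Option Int) : Prop := out = round_winner_alt player1_word player2_word
instance (player1_word : String) (player2_word : String) (out : Option Int) : Decidable (Spec_round_winner player1_word player2_word out) := by unfold Spec_round_winner; infer_instance

-- ===== CLAIM (what is proved, stated in full; the proofs are below) =====
def Claim_equal_round_winner : Prop := ∀ (player1_word : String) (player2_word : String), Dom_round_winner player1_word player2_word → Spec_round_winner player1_word player2_word (round_winner player1_word player2_word)

-- ===== LEMMAS AND PROOFS =====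

-- the substring-count loop of PySem.Chars.count, on a single-character pattern, counts that character
lemma count_go_single (v : Char) (cs : List Char) (acc : Nat) :
    PySem.Chars.count.go [v] cs.length cs acc = acc + cs.count v := by
  induction cs generalizing acc with
  | nil => simp [PySem.Chars.count.go]
  | cons h t ih =>
    simp only [List.length_cons, PySem.Chars.count.go, List.isPrefixOf, List.count_cons]
    by_cases hv : v = h
    · subst hv; simp [ih]; omega
    · have h1 : (v == h) = false := by simpa using hv
      have h2 : (h == v) = false := by simpa using fun e => hv e.symm
      simp [h1, h2, ih]

-- str.count with a single-character needle is the character count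
lemma count_single (s : String) (sub : String) (v : Char) (h : sub.toList = [v]) :
    PySem.Str.count s sub = s.toList.count v := by
  simp only [PySem.Chars.count, PySem.Str.count_eq, h, List.isEmpty_cons, Bool.false_eq_true,
    if_false]
  exact (count_go_single v s.toList 0).trans (by omega)

-- membership in set("aeiou") is the disjunction of the five character tests
lemma contains_vowels (ch : Char) :
    (PySem.Set.ofList "aeiou".toList).contains ch
      = (ch == 'a' || ch == 'e' || ch == 'i' || ch == 'o' || ch == 'u') := by
  have hset : PySem.Set.ofList "aeiou".toList = ['a', 'e', 'i', 'o', 'u'] := by decide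
  rw [hset]
  by_cases h1 : ch = 'a' <;> by_cases h2 : ch = 'e' <;> by_cases h3 : ch = 'i' <;>
    by_cases h4 : ch = 'o' <;> by_cases h5 : ch = 'u' <;> simp_all

-- one membership pass equals the sum of the five per-vowel counts
lemma countP_vowels (l : List Char) :
    l.countP (fun ch => (PySem.Set.ofList "aeiou".toList).contains ch)
      = l.count 'a' + l.count 'e' + l.count 'i' + l.count 'o' + l.count 'u' := by
  simp only [contains_vowels]
  induction l with
  | nil => simp
  | cons h t ih =>
    simp only [List.countP_cons, List.count_cons, ih]
    split_ifs <;> simp_all <;> omega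

lemma vowel_sum_eq (s : String) :
    ((0 : Int) + (PySem.Str.count s "a" : Int) + (PySem.Str.count s "e" : Int)
      + (PySem.Str.count s "i" : Int) + (PySem.Str.count s "o" : Int)
      + (PySem.Str.count s "u" : Int))
    = (s.toList.countP (fun ch => (PySem.Set.ofList "aeiou".toList).contains ch) : Int) := by
  rw [count_single s "a" 'a' (by decide), count_single s "e" 'e' (by decide),
      count_single s "i" 'i' (by decide), count_single s "o" 'o' (by decide),
      count_single s "u" 'u' (by decide), countP_vowels]
  push_cast
  ring

-- ===== VERDICT (by name: the statement is the Claim_ definition above) =====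
theorem round_winner_spec : Claim_equal_round_winner := by
  intro p1 p2 _
  unfold Spec_round_winner round_winner round_winner_alt
  simp only [List.foldl]
  simp only [vowel_sum_eq]
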